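-- pv_equiv track=rewrite | github.com/RevansChen/online-judge | Codewars/7kyu/sexy-primes-%3C3/Python/solution1.py | sexy_prime
-- ===== SOURCE A (Python) =====
-- def sexy_prime(x, y):
--     def isPrime(n):
--         if n in [2, 3, 5, 7]:
--             return True
--         if (n < 2) or (n & 1) == 0:
--             return False
--         for i in range(3, int(n ** 0.5) + 1, 2):
--             if n % i == 0:
--                 return False
--         return True
--
--     return (abs(x - y) == 6) and isPrime(x) and isPrime(y)
-- ===== SOURCE B (Python) =====
-- def sexy_prime(x, y):
--     if abs(x - y) != 6 or x < 2 or y < 2: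
--         return False
--     limit = _isqrt(max(x, y))
--     primes = _sieve(limit)
--     return _has_no_prime_factor(x, primes) and _has_no_prime_factor(y, primes)
--
--
-- def _isqrt(n):
--     # integer Newton iteration; n >= 2 here
--     r = n
--     while r * r > n:
--         r = (r + n // r) // 2
--     return r
--
--
-- def _sieve(limit):
--     # sieve of Eratosthenes, functional filtering form: all primes <= limit
--     nums = list(range(2, limit + 1))
--     primes = []
--     while nums and nums[0] * nums[0] <= limit:
--         p = nums[0]
--         primes.append(p)
--         nums = [k for k in nums if k % p != 0]
--     return primes + nums
--
--
-- def _has_no_prime_factor(n, primes):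
--     for p in primes:
--         if p * p <= n and n % p == 0:
--             return False
--     return True
-- ===== Notes on version B (the rewrite author's own statement) =====
-- stated objective: alternative
-- what changed: isPrime's literal small-prime list, parity bit-test and odd-step float-sqrt-bounded trial division are replaced by a sieve of Eratosthenes (functional filtering form) up to a Newton integer square root of max(x,y), after which each number is only tested for divisibility by the sieve's primes.
import Mathlib
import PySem

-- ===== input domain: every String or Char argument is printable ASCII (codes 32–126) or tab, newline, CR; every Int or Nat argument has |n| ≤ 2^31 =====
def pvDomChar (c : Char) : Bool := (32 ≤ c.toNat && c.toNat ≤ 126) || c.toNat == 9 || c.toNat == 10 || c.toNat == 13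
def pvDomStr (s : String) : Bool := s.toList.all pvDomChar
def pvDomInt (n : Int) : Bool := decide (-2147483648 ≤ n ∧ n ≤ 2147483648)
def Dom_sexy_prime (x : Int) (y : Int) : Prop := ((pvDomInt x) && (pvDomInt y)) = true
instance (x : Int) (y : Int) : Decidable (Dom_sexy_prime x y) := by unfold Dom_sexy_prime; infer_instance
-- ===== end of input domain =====

-- B replaces A's odd-step trial division (with its small-prime literal list and parity bit-test)
-- by a sieve of Eratosthenes up to a Newton integer square root of max(x,y), then tests each
-- number for divisibility only by the sieve's primes; a genuinely different algorithm, same task.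

-- ===== PORT A =====
-- isPrime of A: membership in [2,3,5,7], then (n < 2) or (n & 1) == 0, then the odd-step loop.
-- `int(n ** 0.5)` is ported as Nat.sqrt on n.toNat: exact here, since the branch is only reached
-- for 2 ≤ n, and for n ≤ 2^31 the double-precision sqrt followed by int() equals the integer sqrt.
-- `n & 1` (evaluated only for n ≥ 2) is ported as n % 2.
def isPrimeA (n : Int) : Bool :=
  if n = 2 ∨ n = 3 ∨ n = 5 ∨ n = 7 then true
  else if n < 2 then false
  else if n % 2 = 0 then false
  else if (PySem.List.pyRange 3 ((n.toNat.sqrt : Int) + 1) 2).any (fun i => n % i == 0) then false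
  else true

def sexy_prime (x : Int) (y : Int) : Bool :=
  decide ((x - y).natAbs = 6) && isPrimeA x && isPrimeA y

-- ===== PORT B =====
-- _isqrt: r = n; while r * r > n: r = (r + n // r) // 2; return r.
-- The `1 ≤ r` conjunct is only a totality guard for `//` by zero: on every call B makes
-- (n ≥ 2, initial r = n) the loop keeps 1 ≤ r, so the guard never alters the computation.
def isqrtLoop (n : Int) (r : Int) : Int :=
  if h : 1 ≤ r ∧ n < r * r then
    isqrtLoop n (PySem.Int.floordiv (r + PySem.Int.floordiv n r) 2)
  else r
termination_by r.toNat
decreasing_by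
  obtain ⟨hr, hlt⟩ := h
  have h1 : PySem.Int.floordiv n r < r := by
    rw [PySem.Int.floordiv_lt_iff_lt_mul (by omega)]; nlinarith
  have h2 : PySem.Int.floordiv (r + PySem.Int.floordiv n r) 2 < r := by
    rw [PySem.Int.floordiv_lt_iff_lt_mul (by omega)]; omega
  omega

def isqrtB (n : Int) : Int := isqrtLoop n n

-- _sieve: functional filtering sieve of Eratosthenes, all primes ≤ limit
def sieveLoop (limit : Int) (primes : List Int) (nums : List Int) : List Int :=
  match nums with
  | [] => primes
  | p :: rest =>
    if p * p ≤ limit then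
      sieveLoop limit (primes ++ [p]) ((p :: rest).filter (fun k => !(PySem.Int.mod k p == 0)))
    else primes ++ (p :: rest)
termination_by nums.length
decreasing_by
  have hp : PySem.Int.mod p p = 0 := (PySem.Int.mod_eq_zero_iff_dvd p p).2 dvd_rfl
  simp only [List.filter, hp]
  simp [Nat.lt_succ_iff, List.length_filter_le]

def sieve (limit : Int) : List Int :=
  sieveLoop limit [] (PySem.List.pyRange 2 (limit + 1) 1)

-- _has_no_prime_factor: for p in primes: if p*p <= n and n % p == 0: return False; return True
def hasNoPrimeFactor (n : Int) (primes : List Int) : Bool :=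
  primes.all (fun p => !(decide (p * p ≤ n) && (PySem.Int.mod n p == 0)))

def sexy_prime_alt (x : Int) (y : Int) : Bool :=
  if (x - y).natAbs ≠ 6 ∨ x < 2 ∨ y < 2 then false
  else
    let primes := sieve (isqrtB (max x y))
    hasNoPrimeFactor x primes && hasNoPrimeFactor y primes

-- ===== PRECONDITION & SPEC =====
def Spec_sexy_prime (x : Int) (y : Int) (out : Bool) : Prop := out = sexy_prime_alt x y
instance (x : Int) (y : Int) (out : Bool) : Decidable (Spec_sexy_prime x y out) := by unfold Spec_sexy_prime; infer_instance

-- ===== CLAIM (what is proved, stated in full; the proofs are below) =====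
def Claim_equal_sexy_prime : Prop := ∀ (x : Int) (y : Int), Dom_sexy_prime x y → Spec_sexy_prime x y (sexy_prime x y)

-- ===== LEMMAS AND PROOFS =====

-- the common specification both primality tests decide (n % j is Int.emod; = Python % for j ≥ 2)
def NoSmallDiv (n : Int) : Prop := ∀ j : Int, 2 ≤ j → j * j ≤ n → n % j ≠ 0

-- an integer prime ≥ 2 (what the sieve's completeness needs)
def IsPrimeI (q : Int) : Prop := 2 ≤ q ∧ ∀ d : Int, 2 ≤ d → d < q → ¬ d ∣ q

-- ---- A-side characterisation ----

lemma sq_le_iff_le_sqrt (n j : Int) (hn : 0 ≤ n) (hj : 0 ≤ j) :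
    j * j ≤ n ↔ j ≤ (n.toNat.sqrt : Int) := by
  obtain ⟨a, rfl⟩ := Int.eq_ofNat_of_zero_le hn
  obtain ⟨b, rfl⟩ := Int.eq_ofNat_of_zero_le hj
  simp only [Int.toNat_natCast]
  exact_mod_cast (Nat.le_sqrt (m := b) (n := a)).symm

-- n not 2/3/5/7, n ≥ 2, n odd: A's odd-step loop finds a divisor iff some j ≥ 2 with j*j ≤ n divides n
lemma odd_loop_iff (n : Int) (hn : 2 ≤ n) (hodd : ¬ n % 2 = 0) :
    ((PySem.List.pyRange 3 ((n.toNat.sqrt : Int) + 1) 2).any (fun i => n % i == 0) = true)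
      ↔ ¬ NoSmallDiv n := by
  rw [List.any_eq_true]
  unfold NoSmallDiv
  push Not
  constructor
  · rintro ⟨i, hmem, hdiv⟩
    rw [PySem.List.mem_pyRange_iff_of_pos (by norm_num)] at hmem
    obtain ⟨h3, hlt, -⟩ := hmem
    refine ⟨i, by omega, ?_, by simpa using hdiv⟩
    rw [sq_le_iff_le_sqrt n i (by omega) (by omega)]
    omega
  · rintro ⟨j, hj2, hjj, hdiv⟩
    -- j cannot be even: an even divisor would make n even
    have hjodd : ¬ j % 2 = 0 := by
      intro hje
      apply hodd
      have h2j : (2 : Int) ∣ j := Int.dvd_of_emod_eq_zero hje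
      have hjn : j ∣ n := Int.dvd_of_emod_eq_zero hdiv
      exact Int.emod_eq_zero_of_dvd (dvd_trans h2j hjn)
    refine ⟨j, ?_, by simpa using hdiv⟩
    rw [PySem.List.mem_pyRange_iff_of_pos (by norm_num)]
    refine ⟨by omega, ?_, by omega⟩
    rw [sq_le_iff_le_sqrt n j (by omega) (by omega)] at hjj
    omega

lemma isPrimeA_iff (n : Int) : isPrimeA n = true ↔ 2 ≤ n ∧ NoSmallDiv n := by
  unfold isPrimeA
  split_ifs with hsmall hlt heven hloop
  · -- n ∈ {2,3,5,7}
    simp only [true_iff]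
    rcases hsmall with rfl | rfl | rfl | rfl <;>
      refine ⟨by norm_num, fun j h2 hjj => ?_⟩
    · exfalso; nlinarith
    · exfalso; nlinarith
    · have hj : j = 2 := by nlinarith
      subst hj; decide
    · have hj : j = 2 := by nlinarith
      subst hj; decide
  · simp only [false_iff]; intro ⟨h, _⟩; omega
  · -- even, ≥ 2, not in the list → n ≥ 4 and 2 divides it
    simp only [false_iff]
    intro ⟨h2, hno⟩
    exact hno 2 le_rfl (by omega) (by omega)
  · simp only [false_iff]
    intro ⟨h2, hno⟩
    rw [odd_loop_iff n (by omega) heven] at hloop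
    exact hloop hno
  · simp only [true_iff]
    refine ⟨by omega, ?_⟩
    by_contra hno
    exact hloop ((odd_loop_iff n (by omega) heven).2 hno)

-- ---- B-side: the Newton iteration dominates every square root ----

lemma isqrtLoop_ge (n : Int) (r : Int) (hn : 0 ≤ n)
    (hr : ∀ j : Int, j * j ≤ n → j ≤ r) :
    ∀ j : Int, j * j ≤ n → j ≤ isqrtLoop n r := by
  induction r using isqrtLoop.induct (n := n) with
  | case1 r h ih =>
    obtain ⟨hr1, hlt⟩ := h
    rw [isqrtLoop]
    simp only [hr1, hlt, and_self, dif_pos]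
    apply ih
    intro j hj
    have hjr : j ≤ r := hr j hj
    have hq0 : 0 ≤ PySem.Int.floordiv n r := by
      rw [PySem.Int.le_floordiv_iff_mul_le (by omega)]; omega
    by_cases hj0 : j ≤ 0
    · have : 0 ≤ PySem.Int.floordiv (r + PySem.Int.floordiv n r) 2 := by
        rw [PySem.Int.le_floordiv_iff_mul_le (by omega)]; omega
      omega
    · push Not at hj0
      rw [PySem.Int.le_floordiv_iff_mul_le (by omega)]
      -- j*2 ≤ r + n//r, from (r-j)^2 ≥ 0 and the division identity
      have hid := PySem.Int.floordiv_mul_add_mod n r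
      have hm1 : 0 ≤ PySem.Int.mod n r := by
        rw [PySem.Int.mod_eq_emod_of_pos (by omega)]
        exact Int.emod_nonneg n (by omega)
      have hm2 : PySem.Int.mod n r < r := by
        rw [PySem.Int.mod_eq_emod_of_pos (by omega)]
        exact Int.emod_lt_of_pos n (by omega)
      nlinarith [sq_nonneg (r - j)]
  | case2 r h =>
    rw [isqrtLoop]
    simp only [dif_neg h]
    exact hr

lemma isqrtB_ge (n : Int) (hn : 0 ≤ n) : ∀ j : Int, j * j ≤ n → j ≤ isqrtB n := by
  apply isqrtLoop_ge n n hn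
  intro j hj
  by_cases h : j ≤ 0
  · omega
  · nlinarith

-- ---- B-side: sieve facts ----

lemma sieveLoop_mem_ge (limit : Int) (primes nums : List Int)
    (hp : ∀ k ∈ primes, 2 ≤ k) (hn : ∀ k ∈ nums, 2 ≤ k) :
    ∀ k ∈ sieveLoop limit primes nums, 2 ≤ k := by
  induction primes, nums using sieveLoop.induct (limit := limit) with
  | case1 primes => rw [sieveLoop]; exact hp
  | case2 primes p rest hle ih =>
    rw [sieveLoop]
    simp only [hle, if_pos]
    apply ih
    · intro k hk
      rcases List.mem_append.1 hk with hk | hk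
      · exact hp k hk
      · simp only [List.mem_singleton] at hk
        exact hk ▸ hn p (List.mem_cons_self ..)
    · intro k hk
      exact hn k (List.mem_of_mem_filter hk)
  | case3 primes p rest hgt =>
    rw [sieveLoop]
    simp only [hgt, if_neg, not_false_iff]
    intro k hk
    rcases List.mem_append.1 hk with hk | hk
    · exact hp k hk
    · exact hn k hk

lemma sieveLoop_complete (limit : Int) (primes nums : List Int) (q : Int)
    (hq : IsPrimeI q) (hn : ∀ k ∈ nums, 2 ≤ k)
    (hmem : q ∈ primes ∨ q ∈ nums) :
    q ∈ sieveLoop limit primes nums := by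
  induction primes, nums using sieveLoop.induct (limit := limit) with
  | case1 primes =>
    rw [sieveLoop]
    rcases hmem with h | h
    · exact h
    · simp at h
  | case2 primes p rest hle ih =>
    rw [sieveLoop]
    simp only [hle, if_pos]
    apply ih
    · intro k hk
      exact hn k (List.mem_of_mem_filter hk)
    · rcases hmem with h | h
      · exact Or.inl (List.mem_append_left _ h)
      · by_cases hqp : q = p
        · exact Or.inl (List.mem_append_right _ (by simp [hqp]))
        · refine Or.inr (List.mem_filter.2 ⟨h, ?_⟩)
          simp only [Bool.not_eq_eq_eq_not, Bool.not_true, beq_eq_false_iff_ne, ne_eq]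
          intro hmod
          have hpq : p ∣ q := (PySem.Int.mod_eq_zero_iff_dvd q p).1 hmod
          have hp2 : 2 ≤ p := hn p (List.mem_cons_self ..)
          have hq1 := hq.1
          have hple : p ≤ q := Int.le_of_dvd (by omega) hpq
          exact hq.2 p hp2 (lt_of_le_of_ne hple (Ne.symm hqp)) hpq
  | case3 primes p rest hgt =>
    rw [sieveLoop]
    simp only [hgt, if_neg, not_false_iff]
    rcases hmem with h | h
    · exact List.mem_append_left _ h
    · exact List.mem_append_right _ h

lemma mem_sieve_ge (limit : Int) : ∀ k ∈ sieve limit, 2 ≤ k := by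
  apply sieveLoop_mem_ge
  · intro k hk; simp at hk
  · intro k hk
    rw [PySem.List.mem_pyRange_one] at hk
    omega

lemma sieve_complete (limit : Int) (q : Int) (hq : IsPrimeI q) (hle : q ≤ limit) :
    q ∈ sieve limit := by
  apply sieveLoop_complete _ _ _ _ hq
  · intro k hk
    rw [PySem.List.mem_pyRange_one] at hk
    omega
  · refine Or.inr ?_
    rw [PySem.List.mem_pyRange_one]
    exact ⟨hq.1, by omega⟩

-- ---- B-side: the prime-only divisibility test decides NoSmallDiv ----

lemma hasNo_iff (n M : Int) (h2 : 2 ≤ n) (hnM : n ≤ M) :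
    hasNoPrimeFactor n (sieve (isqrtB M)) = true ↔ NoSmallDiv n := by
  unfold hasNoPrimeFactor
  rw [List.all_eq_true]
  constructor
  · -- contrapositive: a divisor j yields the least prime factor q ∈ sieve
    intro hall j hj2 hjj hmod
    have hjdvd : j ∣ n := Int.dvd_of_emod_eq_zero hmod
    set m : ℕ := n.toNat with hm
    have hm2 : 2 ≤ m := by omega
    have hprime : m.minFac.Prime := Nat.minFac_prime (by omega)
    have hnm : ((m : Int)) = n := Int.toNat_of_nonneg (by omega)
    set q : Int := (m.minFac : Int) with hqdef
    have hq2 : 2 ≤ q := by rw [hqdef]; exact_mod_cast hprime.two_le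
    have hqdvd : q ∣ n := by
      rw [hqdef, ← hnm]
      exact_mod_cast Nat.minFac_dvd m
    have hqlej : q ≤ j := by
      have hjm : j.toNat ∣ m := by
        rw [← Int.natCast_dvd_natCast, Int.toNat_of_nonneg (by omega : (0:Int) ≤ j), hnm]
        exact hjdvd
      have := Nat.minFac_le_of_dvd (by omega) hjm
      rw [hqdef]
      omega
    have hqq : q * q ≤ n := by nlinarith
    have hqprime : IsPrimeI q := by
      refine ⟨hq2, fun d hd2 hdq hddvd => ?_⟩
      have hdm : d.toNat ∣ m.minFac := by
        rw [← Int.natCast_dvd_natCast, Int.toNat_of_nonneg (by omega : (0:Int) ≤ d)]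
        rw [hqdef] at hddvd
        exact hddvd
      have h1 := Nat.Prime.eq_one_or_self_of_dvd hprime _ hdm
      rw [hqdef] at hdq
      omega
    have hqlim : q ≤ isqrtB M := isqrtB_ge M (by omega) q (by omega)
    have hqmem : q ∈ sieve (isqrtB M) := sieve_complete _ q hqprime hqlim
    have := hall q hqmem
    have hmodq : PySem.Int.mod n q = 0 := (PySem.Int.mod_eq_zero_iff_dvd n q).2 hqdvd
    simp [hqq, hmodq] at this
  · intro hno p hp
    have hp2 : 2 ≤ p := mem_sieve_ge _ p hp
    simp only [Bool.not_eq_eq_eq_not, Bool.not_true, Bool.and_eq_false_iff]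
    by_cases hppn : p * p ≤ n
    · refine Or.inr ?_
      simp only [beq_eq_false_iff_ne, ne_eq]
      intro hmod
      have : p ∣ n := (PySem.Int.mod_eq_zero_iff_dvd n p).1 hmod
      exact hno p hp2 hppn (Int.emod_eq_zero_of_dvd this)
    · exact Or.inl (by simpa using hppn)

-- ===== VERDICT (by name: the statement is the Claim_ definition above) =====
theorem sexy_prime_spec : Claim_equal_sexy_prime := by
  intro x y _
  unfold Spec_sexy_prime sexy_prime sexy_prime_alt
  by_cases h6 : (x - y).natAbs = 6
  · by_cases hxy : x < 2 ∨ y < 2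
    · have hA : (isPrimeA x && isPrimeA y) = false := by
        cases hbx : isPrimeA x with
        | false => simp
        | true =>
          have hx2 := ((isPrimeA_iff x).1 hbx).1
          cases hby : isPrimeA y with
          | false => simp
          | true =>
            have hy2 := ((isPrimeA_iff y).1 hby).1
            omega
      simp only [h6, decide_true, Bool.true_and]
      rw [hA, if_pos (by tauto)]
    · push Not at hxy
      obtain ⟨hx2, hy2⟩ := hxy
      rw [if_neg (by push Not; exact ⟨h6, by omega, by omega⟩)]
      simp only [h6, decide_true, Bool.true_and]
      have hx : isPrimeA x = hasNoPrimeFactor x (sieve (isqrtB (max x y))) := by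
        have h1 := isPrimeA_iff x
        have h2 := hasNo_iff x (max x y) hx2 (le_max_left x y)
        cases hb1 : isPrimeA x <;> cases hb2 : hasNoPrimeFactor x (sieve (isqrtB (max x y))) <;>
          simp_all
      have hy : isPrimeA y = hasNoPrimeFactor y (sieve (isqrtB (max x y))) := by
        have h1 := isPrimeA_iff y
        have h2 := hasNo_iff y (max x y) hy2 (le_max_right x y)
        cases hb1 : isPrimeA y <;> cases hb2 : hasNoPrimeFactor y (sieve (isqrtB (max x y))) <;>
          simp_all
      rw [hx, hy]
  · rw [if_pos (Or.inl h6)]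
    simp [h6]
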